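-- pv_equiv track=rewrite | github.com/scfuzzbench/scfuzzbench | analysis/analyze.py | compute_exclusive_events
-- ===== SOURCE A (Python) =====
-- from collections import defaultdict
-- from typing import Any, Dict, Iterable, List, Optional, Tuple
--
-- def compute_exclusive_events(event_sets: Dict[str, set]) -> Tuple[Dict[str, set], Dict[str, set]]:
--     event_to_fuzzers: Dict[str, set] = defaultdict(set)
--     for fuzzer, events in event_sets.items():
--         for event in events:
--             event_to_fuzzers[event].add(fuzzer)
--     exclusive: Dict[str, set] = {fuzzer: set() for fuzzer in event_sets}
--     for event, fuzzers in event_to_fuzzers.items():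
--         if len(fuzzers) == 1:
--             fuzzer = next(iter(fuzzers))
--             exclusive[fuzzer].add(event)
--     return exclusive, event_to_fuzzers
-- ===== SOURCE B (Python) =====
-- from collections import defaultdict
-- from typing import Dict, Tuple
--
--
-- def compute_exclusive_events(event_sets: Dict[str, set]) -> Tuple[Dict[str, set], Dict[str, set]]:
--     # Flatten everything to (event, fuzzer) pairs first, then build the inverted
--     # index (a required return value) in one flat pass over that pair list.
--     pairs = [(event, fuzzer) for fuzzer, events in event_sets.items() for event in events]
--     event_to_fuzzers: Dict[str, set] = defaultdict(set)
--     for event, fuzzer in pairs: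
--         event_to_fuzzers[event].add(fuzzer)
--     # A fuzzer's exclusive events are its own events minus everything any other
--     # fuzzer ever saw -- computed by set difference, not by filtering the index.
--     exclusive: Dict[str, set] = {
--         fuzzer: events - {e for other, evs in event_sets.items() if other != fuzzer for e in evs}
--         for fuzzer, events in event_sets.items()
--     }
--     return exclusive, event_to_fuzzers
-- ===== Notes on version B (the rewrite author's own statement) =====
-- stated objective: alternative
-- what changed: The inverted index is built in one flat pass over a pre-flattened (event, fuzzer) pair list instead of a nested double loop, and each fuzzer's exclusive events are computed directly as a set difference (its events minus the union of every other fuzzer's events, via a dict comprehension) instead of scanning the inverted index for entries with exactly one owner.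
import Mathlib
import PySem

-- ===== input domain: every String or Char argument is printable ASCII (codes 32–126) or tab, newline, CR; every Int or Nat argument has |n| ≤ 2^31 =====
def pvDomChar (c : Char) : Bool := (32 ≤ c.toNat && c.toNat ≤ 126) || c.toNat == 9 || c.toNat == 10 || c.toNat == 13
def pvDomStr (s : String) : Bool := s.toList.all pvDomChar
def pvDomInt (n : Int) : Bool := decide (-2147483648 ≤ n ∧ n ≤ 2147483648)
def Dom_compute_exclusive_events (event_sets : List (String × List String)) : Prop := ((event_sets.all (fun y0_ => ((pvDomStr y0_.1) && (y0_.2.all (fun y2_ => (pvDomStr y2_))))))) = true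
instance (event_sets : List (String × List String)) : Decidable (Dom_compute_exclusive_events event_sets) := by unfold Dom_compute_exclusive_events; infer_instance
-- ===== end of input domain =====

-- B flattens the input into (event, fuzzer) pairs and builds the inverted index in one
-- flat pass, and computes each fuzzer's exclusive events directly by set difference
-- against the union of the other fuzzers' events, instead of filtering the inverted
-- index for single-owner entries (objective: alternative decomposition).

-- ===== PORT A =====
-- event_to_fuzzers: defaultdict(set); d[event].add(fuzzer) = insert event (add (getD event []) fuzzer)
def pvAInv (event_sets : List (String × List String)) : PySem.Dict String (List String) :=
  event_sets.foldl
    (fun d p => p.2.foldl (fun d e => d.insert e (PySem.Set.add (d.getD e []) p.1)) d)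
    PySem.Dict.empty

-- body of `for event, fuzzers in event_to_fuzzers.items(): if len(fuzzers) == 1: ...`
def pvAStep (d : PySem.Dict String (List String)) (q : String × List String) :
    PySem.Dict String (List String) :=
  match q.2 with
  | [f] => d.insert f (PySem.Set.add (d.getD f []) q.1)
  | _ => d

def compute_exclusive_events (event_sets : List (String × List String)) :
    (List (String × List String)) × (List (String × List String)) :=
  let event_to_fuzzers := pvAInv event_sets
  let exclusive0 := event_sets.foldl (fun d p => d.insert p.1 PySem.Set.empty) PySem.Dict.empty
  let exclusive := event_to_fuzzers.items.foldl pvAStep exclusive0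
  (exclusive.items, event_to_fuzzers.items)

-- ===== PORT B =====
-- pairs = [(event, fuzzer) for fuzzer, events in event_sets.items() for event in events]
def pvPairs (event_sets : List (String × List String)) : List (String × String) :=
  event_sets.flatMap (fun p => p.2.map (fun e => (e, p.1)))

-- the set comprehension {e for other, evs in event_sets.items() if other != fuzzer for e in evs}
def pvBOthers (event_sets : List (String × List String)) (fuzzer : String) : PySem.Set String :=
  PySem.Set.ofList ((event_sets.filter (fun q => !(q.1 == fuzzer))).flatMap Prod.snd)

-- the dict comprehension has the input dict's (pairwise distinct) keys, so its
-- association list is a map over event_sets in order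
def compute_exclusive_events_alt (event_sets : List (String × List String)) :
    (List (String × List String)) × (List (String × List String)) :=
  let event_to_fuzzers :=
    (pvPairs event_sets).foldl
      (fun d q => d.modify q.1 [] (fun s => PySem.Set.add s q.2)) PySem.Dict.empty
  let exclusive :=
    event_sets.map (fun p => (p.1, PySem.Set.diff p.2 (pvBOthers event_sets p.1)))
  (exclusive, event_to_fuzzers.items)

-- ===== PRECONDITION & SPEC =====
-- Pre_ is only the representation invariant of the Python input type dict[str, set]:
-- fuzzer keys pairwise distinct, each event list duplicate-free. Every Python call
-- satisfies it; no Python-reachable input is excluded.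
def Pre_compute_exclusive_events (event_sets : List (String × List String)) : Prop :=
  (event_sets.map Prod.fst).Nodup ∧ ∀ p ∈ event_sets, (p.2 : List String).Nodup

instance (event_sets : List (String × List String)) : Decidable (Pre_compute_exclusive_events event_sets) := by
  unfold Pre_compute_exclusive_events; infer_instance

def pvWitness_compute_exclusive_events : (List (String × List String)) :=
  [("afl", ["crash", "hang"]), ("libfuzzer", ["hang", "oom"])]

def Spec_compute_exclusive_events (event_sets : List (String × List String)) (out : (List (String × List String)) × (List (String × List String))) : Prop := out = compute_exclusive_events_alt event_sets
instance (event_sets : List (String × List String)) (out : (List (String × List String)) × (List (String × List String))) : Decidable (Spec_compute_exclusive_events event_sets out) := by unfold Spec_compute_exclusive_events; infer_instance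

-- ===== CLAIM (what is proved, stated in full; the proofs are below) =====
def Claim_equal_compute_exclusive_events : Prop := ∀ (event_sets : List (String × List String)), Dom_compute_exclusive_events event_sets → Pre_compute_exclusive_events event_sets → Spec_compute_exclusive_events event_sets (compute_exclusive_events event_sets)

-- ===== LEMMAS AND PROOFS =====

-- fuzzers owning event e, in event_sets order
def pvOwners (event_sets : List (String × List String)) (e : String) : List String :=
  (event_sets.filter (fun p => p.2.contains e)).map Prod.fst

-- all events, concatenated in traversal order
def pvAllEv (event_sets : List (String × List String)) : List String :=
  event_sets.flatMap Prod.snd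

-- B's flat pass over the pair list computes A's nested inverted-index loop
lemma pvBInv_eq (es : List (String × List String)) :
    (pvPairs es).foldl
      (fun d q => d.modify q.1 [] (fun s => PySem.Set.add s q.2)) PySem.Dict.empty
      = pvAInv es := by
  unfold pvPairs pvAInv
  suffices h : ∀ (l : List (String × List String)) (d : PySem.Dict String (List String)),
      (l.flatMap (fun p => p.2.map (fun e => (e, p.1)))).foldl
        (fun d q => d.modify q.1 [] (fun s => PySem.Set.add s q.2)) d
      = l.foldl
        (fun d p => p.2.foldl (fun d e => d.insert e (PySem.Set.add (d.getD e []) p.1)) d) d by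
    exact h es PySem.Dict.empty
  intro l
  induction l with
  | nil => intro d; rfl
  | cons p rest ih =>
    intro d
    rw [List.flatMap_cons, List.foldl_append, List.foldl_map, ih]
    rfl

lemma pvDiff_eq (s t : PySem.Set String) :
    PySem.Set.diff s t = s.filter (fun x => !(PySem.Set.contains t x)) := by
  unfold PySem.Set.diff PySem.Set.contains; rfl

lemma pvOfList_filter (L : List String) (P : String → Bool) :
    PySem.Set.ofList (L.filter P) = (PySem.Set.ofList L).filter P := by
  induction L using List.reverseRecOn with
  | nil => rfl
  | append_singleton xs x ih =>
    rw [List.filter_append, PySem.Set.ofList_append_singleton]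
    by_cases hP : P x = true
    · simp only [List.filter_cons, hP, if_pos, List.filter_nil]
      rw [PySem.Set.ofList_append_singleton, ih]
      rw [PySem.Set.add_eq_ite, PySem.Set.add_eq_ite]
      by_cases hx : x ∈ PySem.Set.ofList xs
      · have hx2 : x ∈ (PySem.Set.ofList xs).filter P := List.mem_filter.2 ⟨hx, hP⟩
        simp [hx, hx2]
      · have hx2 : x ∉ (PySem.Set.ofList xs).filter P := fun h => hx (List.mem_filter.1 h).1
        simp [hx, hx2, List.filter_append, hP]
    · simp only [List.filter_cons, hP]
      simp only [Bool.false_eq_true, if_false, List.filter_nil, List.append_nil, ih]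
      rw [PySem.Set.add_eq_ite]
      by_cases hx : x ∈ PySem.Set.ofList xs
      · simp [hx]
      · simp [hx, List.filter_append, hP]

lemma pvBOthers_mem (es : List (String × List String)) (g y : String) :
    y ∈ pvBOthers es g ↔ ∃ q ∈ es, q.1 ≠ g ∧ y ∈ q.2 := by
  unfold pvBOthers
  rw [PySem.Set.mem_ofList, List.mem_flatMap]
  constructor
  · rintro ⟨q, hq, hy⟩
    rcases List.mem_filter.1 hq with ⟨hqes, hne⟩
    exact ⟨q, hqes, by simpa using hne, hy⟩
  · rintro ⟨q, hq, hne, hy⟩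
    exact ⟨q, List.mem_filter.2 ⟨hq, by simpa using hne⟩, hy⟩

lemma pvMem_owners (es : List (String × List String)) (q : String × List String)
    (hq : q ∈ es) (e : String) (he : e ∈ q.2) : q.1 ∈ pvOwners es e := by
  unfold pvOwners
  exact List.mem_map_of_mem (List.mem_filter.2 ⟨hq, by simpa using he⟩)

lemma pvSplit (es : List (String × List String)) (hnd : (es.map Prod.fst).Nodup)
    (g : String) (evs : List String) (hmem : (g, evs) ∈ es) :
    ∀ q ∈ es, q ≠ (g, evs) → q.1 ≠ g := by
  intro q hq hne
  intro hq1
  -- two distinct list positions with the same fst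
  rcases List.append_of_mem hmem with ⟨s, t, rfl⟩
  rw [List.map_append, List.map_cons] at hnd
  rcases List.nodup_append.1 hnd with ⟨_, hnd2, hdisj⟩
  rcases List.mem_append.1 hq with hqs | hqt
  · exact hdisj q.1 (List.mem_map_of_mem hqs) q.1 (by rw [hq1]; exact List.mem_cons_self ..) rfl
  · rcases List.mem_cons.1 hqt with rfl | hqt2
    · exact hne rfl
    · exact (List.nodup_cons.1 hnd2).1 (List.mem_map.2 ⟨q, hqt2, hq1⟩)

lemma pvOwners_append (es : List (String × List String)) (f : String) (evs : List String)
    (e : String) :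
    pvOwners (es ++ [(f, evs)]) e
      = pvOwners es e ++ (if e ∈ evs then [f] else []) := by
  unfold pvOwners
  rw [List.filter_append, List.map_append]
  congr 1
  by_cases he : e ∈ evs
  · have : (evs.contains e) = true := by simpa using he
    simp [this, he]
  · have : (evs.contains e) = false := by simpa using he
    simp [this, he]

lemma pvOwners_sub (es : List (String × List String)) (e g : String)
    (hg : g ∈ pvOwners es e) : g ∈ es.map Prod.fst := by
  unfold pvOwners at hg
  rcases List.mem_map.1 hg with ⟨p, hp, rfl⟩
  exact List.mem_map_of_mem (List.mem_of_mem_filter hp)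

lemma pvOwners_nil_of_not_mem (es : List (String × List String)) (e : String)
    (he : e ∉ pvAllEv es) : pvOwners es e = [] := by
  unfold pvOwners
  rw [List.map_eq_nil_iff, List.filter_eq_nil_iff]
  intro p hp hcon
  exact he (List.mem_flatMap.2 ⟨p, hp, by simpa using hcon⟩)

lemma pvIL (f : String) (evs : List String) (hnd : evs.Nodup) :
    ∀ (d : PySem.Dict String (List String)), d.keys.Nodup →
    (∀ k v, d.get? k = some v → k ∈ evs → f ∉ v) →
    (evs.foldl (fun d e => d.insert e (PySem.Set.add (d.getD e []) f)) d).items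
      = d.items.map (fun p => if p.1 ∈ evs then (p.1, p.2 ++ [f]) else p)
        ++ (evs.filter (fun e => !(d.contains e))).map (fun e => (e, [f])) := by
  induction evs with
  | nil => intro d hk hval; simp
  | cons e rest ih =>
    intro d hk hval
    have hnd' : rest.Nodup := hnd.of_cons
    have hene : e ∉ rest := (List.nodup_cons.1 hnd).1
    simp only [List.foldl_cons]
    by_cases hc : d.contains e = true
    · -- e already a key
      obtain ⟨v, hv⟩ : ∃ v, d.get? e = some v := by
        cases hg : d.get? e with
        | none => rw [PySem.Dict.contains_eq_isSome_get?, hg] at hc; simp at hc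
        | some v => exact ⟨v, rfl⟩
      have hgd : d.getD e [] = v := PySem.Dict.getD_of_get?_eq_some _ _ hv
      have hfv : f ∉ v := hval e v hv (List.mem_cons_self ..)
      have hadd : PySem.Set.add (d.getD e []) f = v ++ [f] := by
        rw [hgd]; exact PySem.Set.add_of_not_mem hfv
      set d' := d.insert e (PySem.Set.add (d.getD e []) f) with hd'
      have hitems' : d'.items = d.items.map (fun p => if p.1 == e then (e, v ++ [f]) else p) := by
        rw [hd', hadd]; exact PySem.Dict.items_insert_of_contains _ _ hc
      have hkeys' : d'.keys = d.keys := by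
        rw [hd']; exact PySem.Dict.keys_insert_of_contains _ _ hc
      have hval' : ∀ k w, d'.get? k = some w → k ∈ rest → f ∉ w := by
        intro k w hw hkrest
        have hke : k ≠ e := fun h => hene (h ▸ hkrest)
        rw [hd', PySem.Dict.get?_insert_of_ne _ _ hke] at hw
        exact hval k w hw (List.mem_cons_of_mem _ hkrest)
      rw [ih hnd' d' (hkeys' ▸ hk) hval']
      rw [hitems', List.map_map]
      congr 1
      · apply List.map_congr_left
        intro p hp
        by_cases hpe : p.1 = e
        · have hpv : p.2 = v := by
            have h1 : d.get? p.1 = some p.2 := by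
              obtain ⟨p1, p2⟩ := p
              exact PySem.Dict.get?_of_mem_items _ hp hk
            rw [hpe, hv] at h1; exact Option.some_inj.1 h1.symm
          have hb : (p.1 == e) = true := by simp [hpe]
          simp only [Function.comp, hb, if_pos]
          simp [hene, hpe, List.mem_cons, hpv]
        · have hb : (p.1 == e) = false := by simp [hpe]
          simp only [Function.comp, hb]
          simp [hpe, List.mem_cons]
      · -- appended parts
        have hfilt : rest.filter (fun x => !(d'.contains x))
            = rest.filter (fun x => !(d.contains x)) := by
          apply List.filter_congr
          intro x hx
          have hxe : (x == e) = false := by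
            simp only [beq_eq_false_iff_ne, ne_eq]
            exact fun h => hene (h ▸ hx)
          rw [hd', PySem.Dict.contains_insert, hxe, Bool.false_or]
        have hfilt2 : (e :: rest).filter (fun x => !(d.contains x))
            = rest.filter (fun x => !(d.contains x)) := by
          simp [hc]
        rw [hfilt, hfilt2]
    · -- e fresh
      have hcf : d.contains e = false := by revert hc; cases d.contains e <;> simp
      have hgd : d.getD e [] = [] := PySem.Dict.getD_of_not_contains _ _ hcf
      have hadd : PySem.Set.add (d.getD e []) f = [f] := by rw [hgd]; rfl
      set d' := d.insert e (PySem.Set.add (d.getD e []) f) with hd'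
      have hitems' : d'.items = d.items ++ [(e, [f])] := by
        rw [hd', hadd]; exact PySem.Dict.items_insert_of_not_contains _ _ hcf
      have hkeys' : d'.keys.Nodup := by
        rw [hd']; exact PySem.Dict.nodup_keys_insert _ _ _ hk
      have hval' : ∀ k w, d'.get? k = some w → k ∈ rest → f ∉ w := by
        intro k w hw hkrest
        have hke : k ≠ e := fun h => hene (h ▸ hkrest)
        rw [hd', PySem.Dict.get?_insert_of_ne _ _ hke] at hw
        exact hval k w hw (List.mem_cons_of_mem _ hkrest)
      rw [ih hnd' d' hkeys' hval']
      rw [hitems', List.map_append]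
      have hmap1 : [((e : String), ([f] : List String))].map
          (fun p => if p.1 ∈ rest then (p.1, p.2 ++ [f]) else p) = [(e, [f])] := by
        simp [hene]
      rw [hmap1]
      have hmape : ∀ p ∈ d.items,
          (if p.1 ∈ rest then (p.1, p.2 ++ [f]) else p)
            = (if p.1 ∈ e :: rest then (p.1, p.2 ++ [f]) else p) := by
        intro p hp
        have hpe : p.1 ≠ e := by
          intro h
          have hmem : d.contains p.1 = true := by
            rw [PySem.Dict.contains_iff_mem_keys]
            exact List.mem_map_of_mem hp
          rw [h, hcf] at hmem; exact absurd hmem (by simp)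
        simp [List.mem_cons, hpe]
      rw [List.map_congr_left hmape]
      have hfilt : rest.filter (fun x => !(d'.contains x))
          = rest.filter (fun x => !(d.contains x)) := by
        apply List.filter_congr
        intro x hx
        have hxe : (x == e) = false := by
          simp only [beq_eq_false_iff_ne, ne_eq]
          exact fun h => hene (h ▸ hx)
        rw [hd', PySem.Dict.contains_insert, hxe, Bool.false_or]
      have hfilt2 : (e :: rest).filter (fun x => !(d.contains x))
          = e :: rest.filter (fun x => !(d.contains x)) := by
        simp [hcf]
      rw [hfilt, hfilt2]
      simp

lemma pvInv_items (es : List (String × List String))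
    (hpre : Pre_compute_exclusive_events es) :
    (pvAInv es).items
      = (PySem.Set.ofList (pvAllEv es)).map (fun e => (e, pvOwners es e)) := by
  induction es using List.reverseRecOn with
  | nil => rfl
  | append_singleton es p ih =>
    obtain ⟨f, evs⟩ := p
    have hkf : f ∉ es.map Prod.fst ∧ (es.map Prod.fst).Nodup := by
      have h := hpre.1
      rw [List.map_append] at h
      simp only [List.map_cons, List.map_nil] at h
      rcases List.nodup_append.1 h with ⟨h1, h2, h3⟩
      exact ⟨fun hm => h3 f hm f (List.mem_singleton_self f) rfl, h1⟩
    have hpre' : Pre_compute_exclusive_events es :=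
      ⟨hkf.2, fun q hq => hpre.2 q (List.mem_append_left _ hq)⟩
    have hevs : evs.Nodup := hpre.2 (f, evs) (List.mem_append_right _ (List.mem_singleton_self _))
    have ihh := ih hpre'
    set d := pvAInv es with hd
    have hA : pvAInv (es ++ [(f, evs)])
        = evs.foldl (fun d e => d.insert e (PySem.Set.add (d.getD e []) f)) d := by
      unfold pvAInv
      rw [List.foldl_append]
      rfl
    have hkeys : d.keys = PySem.Set.ofList (pvAllEv es) := by
      show d.items.map Prod.fst = _
      rw [ihh, List.map_map]
      simp [Function.comp_def]
    have hk : d.keys.Nodup := by rw [hkeys]; exact PySem.Set.nodup_ofList _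
    have hval : ∀ k v, d.get? k = some v → k ∈ evs → f ∉ v := by
      intro k v hv _ hfv
      have hmem : (k, v) ∈ d.items := PySem.Dict.mem_items_of_get?_eq_some _ hv
      rw [ihh] at hmem
      rcases List.mem_map.1 hmem with ⟨e, _, heq⟩
      injection heq with h1 h2
      subst h1; subst h2
      exact hkf.1 (pvOwners_sub es e f hfv)
    rw [hA, pvIL f evs hevs d hk hval]
    -- RHS reshaping
    have hAll : pvAllEv (es ++ [(f, evs)]) = pvAllEv es ++ evs := by
      unfold pvAllEv; simp
    have hcont : ∀ y, ((PySem.Set.ofList (pvAllEv es)).contains y) = d.contains y := by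
      intro y
      by_cases hy : y ∈ PySem.Set.ofList (pvAllEv es)
      · have h1 : d.contains y = true := by
          rw [PySem.Dict.contains_iff_mem_keys, hkeys]; exact hy
        have h2 : ((PySem.Set.ofList (pvAllEv es)).contains y) = true := by
          simpa using hy
        rw [h1, h2]
      · have h1 : d.contains y = false := by
          rw [← Bool.not_eq_true, PySem.Dict.contains_iff_mem_keys, hkeys]; exact hy
        have h2 : ((PySem.Set.ofList (pvAllEv es)).contains y) = false := by
          simpa using hy
        rw [h1, h2]
    rw [hAll, PySem.Set.ofList_append, PySem.Set.update_eq_append_filter,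
        PySem.Set.ofList_eq_self_of_nodup evs hevs, List.map_append]
    congr 1
    · -- updated existing entries
      rw [ihh, List.map_map]
      apply List.map_congr_left
      intro e he
      simp only [Function.comp]
      rw [pvOwners_append]
      by_cases hev : e ∈ evs <;> simp [hev]
    · -- fresh events
      have : evs.filter (fun y => !(PySem.Set.ofList (pvAllEv es)).contains y)
           = evs.filter (fun y => !(d.contains y)) := by
        apply List.filter_congr; intro x _; rw [hcont]
      rw [this]
      apply List.map_congr_left
      intro e he
      rcases List.mem_filter.1 he with ⟨hee, hne⟩
      have hnotA : e ∉ pvAllEv es := by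
        intro hmem
        have : d.contains e = true := by
          rw [PySem.Dict.contains_iff_mem_keys, hkeys]
          simpa [PySem.Set.mem_ofList] using hmem
        rw [this] at hne; exact absurd hne (by simp)
      rw [pvOwners_append, pvOwners_nil_of_not_mem es e hnotA]
      simp [hee]

lemma pvML (L : List (String × List String)) :
    ∀ (d : PySem.Dict String (List String)), d.keys.Nodup →
    (∀ q ∈ L, ∀ g : String, q.2 = [g] → d.contains g = true) →
    (L.map Prod.fst).Nodup →
    (∀ q ∈ L, ∀ v ∈ d.values, q.1 ∉ v) →
    (L.foldl pvAStep d).items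
      = d.items.map (fun p => (p.1, p.2 ++ (L.filter (fun q => q.2 == [p.1])).map Prod.fst)) := by
  induction L with
  | nil =>
    intro d _ _ _ _
    simp
  | cons q rest ih =>
    intro d hk hin hL hdis
    have hLc := hL
    rw [List.map_cons, List.nodup_cons] at hLc
    have hL' : (rest.map Prod.fst).Nodup := hLc.2
    have hq1 : q.1 ∉ rest.map Prod.fst := hLc.1
    simp only [List.foldl_cons]
    cases hq2 : q.2 with
    | nil =>
      have hstep : pvAStep d q = d := by unfold pvAStep; rw [hq2]
      rw [hstep, ih d hk (fun q' hq' g hg => hin q' (List.mem_cons_of_mem _ hq') g hg) hL'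
        (fun q' hq' v hv => hdis q' (List.mem_cons_of_mem _ hq') v hv)]
      apply List.map_congr_left
      intro p _
      have : (q.2 == [p.1]) = false := by rw [hq2]; rfl
      simp [this]
    | cons g t =>
      cases t with
      | cons b t2 =>
        have hstep : pvAStep d q = d := by unfold pvAStep; rw [hq2]
        rw [hstep, ih d hk (fun q' hq' g hg => hin q' (List.mem_cons_of_mem _ hq') g hg) hL'
          (fun q' hq' v hv => hdis q' (List.mem_cons_of_mem _ hq') v hv)]
        apply List.map_congr_left
        intro p _
        have : (q.2 == [p.1]) = false := by
          rw [hq2]; simp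
        simp [this]
      | nil =>
        -- q.2 = [g]
        have hstep : pvAStep d q = d.insert g (PySem.Set.add (d.getD g []) q.1) := by
          unfold pvAStep; rw [hq2]
        have hcg : d.contains g = true := hin q (List.mem_cons_self ..) g hq2
        obtain ⟨v, hv⟩ : ∃ v, d.get? g = some v := by
          cases hg : d.get? g with
          | none => rw [PySem.Dict.contains_eq_isSome_get?, hg] at hcg; simp at hcg
          | some v => exact ⟨v, rfl⟩
        have hgd : d.getD g [] = v := PySem.Dict.getD_of_get?_eq_some _ _ hv
        have hvval : v ∈ d.values := by
          have : (g, v) ∈ d.items := PySem.Dict.mem_items_of_get?_eq_some _ hv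
          exact List.mem_map_of_mem this
        have hq1v : q.1 ∉ v := hdis q (List.mem_cons_self ..) v hvval
        have hadd : PySem.Set.add (d.getD g []) q.1 = v ++ [q.1] := by
          rw [hgd]; exact PySem.Set.add_of_not_mem hq1v
        set d' := d.insert g (PySem.Set.add (d.getD g []) q.1) with hd'
        have hitems' : d'.items = d.items.map (fun p => if p.1 == g then (g, v ++ [q.1]) else p) := by
          rw [hd', hadd]; exact PySem.Dict.items_insert_of_contains _ _ hcg
        have hkeys' : d'.keys = d.keys := by
          rw [hd']; exact PySem.Dict.keys_insert_of_contains _ _ hcg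
        have hk' : d'.keys.Nodup := hkeys' ▸ hk
        have hin' : ∀ q' ∈ rest, ∀ g' : String, q'.2 = [g'] → d'.contains g' = true := by
          intro q' hq' g' hg'
          rw [hd', PySem.Dict.contains_insert]
          rw [hin q' (List.mem_cons_of_mem _ hq') g' hg', Bool.or_true]
        have hdis' : ∀ q' ∈ rest, ∀ w ∈ d'.values, q'.1 ∉ w := by
          intro q' hq' w hw
          rcases PySem.Dict.mem_values_insert _ _ _ _ (hd' ▸ hw) with rfl | hwd
          · rw [hadd]
            intro hmem
            rcases List.mem_append.1 hmem with hmem | hmem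
            · exact hdis q' (List.mem_cons_of_mem _ hq') v hvval hmem
            · rcases List.mem_singleton.1 hmem with h
              exact hq1 (h ▸ List.mem_map_of_mem hq')
          · exact hdis q' (List.mem_cons_of_mem _ hq') w hwd
        rw [hstep, ih d' hk' hin' hL' hdis']
        rw [hitems', List.map_map]
        apply List.map_congr_left
        intro p hp
        simp only [Function.comp]
        by_cases hpg : p.1 = g
        · have hb : (p.1 == g) = true := by simp [hpg]
          have hpv : p.2 = v := by
            have h1 : d.get? p.1 = some p.2 := by
              obtain ⟨p1, p2⟩ := p
              exact PySem.Dict.get?_of_mem_items _ hp hk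
            rw [hpg, hv] at h1; exact Option.some_inj.1 h1.symm
          simp only [hb, if_pos]
          rw [List.filter_cons, hpg, hq2]
          simp [hpv]
        · have hb : (p.1 == g) = false := by simp [hpg]
          have hfq : (q.2 == [p.1]) = false := by
            rw [hq2]
            simp [Ne.symm hpg]
          simp only [hb, Bool.false_eq_true, if_false]
          rw [List.filter_cons, hfq]
          simp

lemma pvOwners_single (es : List (String × List String))
    (hpre : Pre_compute_exclusive_events es)
    (g : String) (evs : List String) (hmem : (g, evs) ∈ es)
    (e : String) (he : e ∈ evs)
    (hno : ∀ q ∈ es, q.1 ≠ g → e ∉ q.2) :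
    pvOwners es e = [g] := by
  rcases List.append_of_mem hmem with ⟨s, t, rfl⟩
  have hflt : ∀ L : List (String × List String), (∀ q ∈ L, q ∈ s ++ (g, evs) :: t) →
      (∀ q ∈ L, q ≠ (g, evs)) → L.filter (fun p => p.2.contains e) = [] := by
    intro L hsub hne
    rw [List.filter_eq_nil_iff]
    intro q hq hcon
    have hq1 : q.1 ≠ g := pvSplit _ hpre.1 g evs hmem q (hsub q hq) (hne q hq)
    exact hno q (hsub q hq) hq1 (by simpa using hcon)
  unfold pvOwners
  rw [List.filter_append, List.filter_cons]
  have hs : s.filter (fun p => p.2.contains e) = [] := by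
    apply hflt s (fun q hq => List.mem_append_left _ hq)
    intro q hq hqe
    subst hqe
    -- (g,evs) ∈ s contradicts Nodup keys
    have hnd := hpre.1
    rw [List.map_append, List.map_cons] at hnd
    rcases List.nodup_append.1 hnd with ⟨_, _, hdisj⟩
    exact hdisj g (List.mem_map_of_mem hq) g (List.mem_cons_self ..) rfl
  have ht : t.filter (fun p => p.2.contains e) = [] := by
    apply hflt t (fun q hq => List.mem_append_right _ (List.mem_cons_of_mem _ hq))
    intro q hq hqe
    subst hqe
    have hnd := hpre.1
    rw [List.map_append, List.map_cons] at hnd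
    rcases List.nodup_append.1 hnd with ⟨_, hnd2, _⟩
    exact (List.nodup_cons.1 hnd2).1 (List.mem_map_of_mem hq)
  have hcon : (((g, evs).2 : List String).contains e) = true := by simpa using he
  rw [hs, ht, hcon]
  simp

lemma pvORD (es : List (String × List String)) (hpre : Pre_compute_exclusive_events es)
    (g : String) (evs : List String) (hmem : (g, evs) ∈ es) :
    (PySem.Set.ofList (pvAllEv es)).filter (fun e => pvOwners es e == [g])
      = evs.filter (fun e => pvOwners es e == [g]) := by
  rw [← pvOfList_filter]
  rcases List.append_of_mem hmem with ⟨s, t, hes⟩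
  have hnil : ∀ L : List (String × List String), (∀ q ∈ L, q ∈ es ∧ q.1 ≠ g) →
      (pvAllEv L).filter (fun e => pvOwners es e == [g]) = [] := by
    intro L hsub
    rw [List.filter_eq_nil_iff]
    intro x hx hPx
    rcases List.mem_flatMap.1 hx with ⟨q, hq, hxq⟩
    have hown : pvOwners es x = [g] := by simpa using hPx
    have : q.1 ∈ pvOwners es x := pvMem_owners es q (hsub q hq).1 x hxq
    rw [hown] at this
    exact (hsub q hq).2 (List.mem_singleton.1 this)
  have hsS : ∀ q ∈ s, q ∈ es ∧ q.1 ≠ g := by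
    intro q hq
    have hqes : q ∈ es := hes ▸ List.mem_append_left _ hq
    refine ⟨hqes, pvSplit es hpre.1 g evs hmem q hqes ?_⟩
    intro hqe
    subst hqe
    have hnd := hpre.1
    rw [hes, List.map_append, List.map_cons] at hnd
    rcases List.nodup_append.1 hnd with ⟨_, _, hdisj⟩
    exact hdisj g (List.mem_map_of_mem hq) g (List.mem_cons_self ..) rfl
  have htS : ∀ q ∈ t, q ∈ es ∧ q.1 ≠ g := by
    intro q hq
    have hqes : q ∈ es := hes ▸ List.mem_append_right _ (List.mem_cons_of_mem _ hq)
    refine ⟨hqes, pvSplit es hpre.1 g evs hmem q hqes ?_⟩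
    intro hqe
    subst hqe
    have hnd := hpre.1
    rw [hes, List.map_append, List.map_cons] at hnd
    rcases List.nodup_append.1 hnd with ⟨_, hnd2, _⟩
    exact (List.nodup_cons.1 hnd2).1 (List.mem_map_of_mem hq)
  have hAll : pvAllEv es = pvAllEv s ++ (evs ++ pvAllEv t) := by
    rw [hes]; unfold pvAllEv; simp
  conv_lhs => rw [hAll]
  rw [List.filter_append, List.filter_append, hnil s hsS, hnil t htS,
      List.nil_append, List.append_nil]
  have hevnd : evs.Nodup := hpre.2 (g, evs) hmem
  exact PySem.Set.ofList_eq_self_of_nodup _ (hevnd.filter _)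

lemma pvPointwise (es : List (String × List String)) (hpre : Pre_compute_exclusive_events es)
    (g : String) (evs : List String) (hmem : (g, evs) ∈ es) (e : String) (he : e ∈ evs) :
    (pvOwners es e == [g]) = !(PySem.Set.contains (pvBOthers es g) e) := by
  by_cases hown : pvOwners es e = [g]
  · have h1 : (pvOwners es e == [g]) = true := by simpa using hown
    have h2 : e ∉ pvBOthers es g := by
      rw [pvBOthers_mem]
      rintro ⟨q, hq, hne, heq⟩
      have : q.1 ∈ pvOwners es e := pvMem_owners es q hq e heq
      rw [hown] at this
      exact hne (List.mem_singleton.1 this)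
    have h3 : (PySem.Set.contains (pvBOthers es g) e) = false := by
      rw [← Bool.not_eq_true, PySem.Set.contains_iff]; exact h2
    rw [h1, h3]; rfl
  · have h1 : (pvOwners es e == [g]) = false := by simpa using hown
    have h2 : e ∈ pvBOthers es g := by
      rw [pvBOthers_mem]
      by_contra hno
      exact hown (pvOwners_single es hpre g evs hmem e he
        (fun q hq hne he2 => hno ⟨q, hq, hne, he2⟩))
    have h3 : (PySem.Set.contains (pvBOthers es g) e) = true := by
      rw [PySem.Set.contains_iff]; exact h2
    rw [h1, h3]; rfl

-- final assembly
lemma pv_main (es : List (String × List String))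
    (hpre : Pre_compute_exclusive_events es) :
    compute_exclusive_events es = compute_exclusive_events_alt es := by
  unfold compute_exclusive_events compute_exclusive_events_alt
  rw [pvBInv_eq]
  dsimp only
  congr 1
  -- first components: A's exclusive dict has B's map as its association list
  have hnd1 : (es.map Prod.fst).Nodup := hpre.1
  have hex0 : (es.foldl (fun d p => d.insert p.1 PySem.Set.empty) PySem.Dict.empty).items
      = es.map (fun p => (p.1, ([] : List String))) := by
    rw [PySem.Dict.items_foldl_insert_fresh es Prod.fst (fun _ => PySem.Set.empty)
      PySem.Dict.empty (fun a _ => PySem.Dict.contains_empty _) hnd1]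
    rfl
  set d0 := es.foldl (fun d p => d.insert p.1 PySem.Set.empty) PySem.Dict.empty with hd0
  have hkeys0 : d0.keys = es.map Prod.fst := by
    show d0.items.map Prod.fst = _
    rw [hex0, List.map_map]
    simp [Function.comp_def]
  have hk0 : d0.keys.Nodup := by rw [hkeys0]; exact hnd1
  have hLitems := pvInv_items es hpre
  have hin : ∀ q ∈ (pvAInv es).items, ∀ g : String, q.2 = [g] → d0.contains g = true := by
    intro q hq g hg
    rw [hLitems] at hq
    rcases List.mem_map.1 hq with ⟨e, _, heq⟩
    rw [PySem.Dict.contains_iff_mem_keys, hkeys0]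
    apply pvOwners_sub es e
    have : q.2 = pvOwners es e := by rw [← heq]
    rw [hg] at this
    rw [← this]
    exact List.mem_singleton_self g
  have hLnd : ((pvAInv es).items.map Prod.fst).Nodup := by
    rw [hLitems, List.map_map]
    simp only [Function.comp_def]
    have : (PySem.Set.ofList (pvAllEv es)).map (fun e => ((e, pvOwners es e) : String × List String).1)
        = PySem.Set.ofList (pvAllEv es) := by simp
    rw [this]
    exact PySem.Set.nodup_ofList _
  have hdis : ∀ q ∈ (pvAInv es).items, ∀ v ∈ d0.values, q.1 ∉ v := by
    intro q _ v hv
    have : v = [] := by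
      have hvals : d0.values = d0.items.map Prod.snd := rfl
      rw [hvals, hex0, List.map_map] at hv
      simp only [Function.comp_def] at hv
      rcases List.mem_map.1 hv with ⟨p, _, hp⟩
      exact hp.symm
    rw [this]
    exact List.not_mem_nil
  rw [pvML (pvAInv es).items d0 hk0 hin hLnd hdis, hex0, List.map_map]
  apply List.map_congr_left
  intro p hp
  obtain ⟨g, evs⟩ := p
  simp only [Function.comp_def, List.nil_append]
  have hcollect : ((pvAInv es).items.filter (fun q => q.2 == [g])).map Prod.fst
      = (PySem.Set.ofList (pvAllEv es)).filter (fun e => pvOwners es e == [g]) := by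
    rw [hLitems, List.filter_map, List.map_map]
    simp [Function.comp_def]
  rw [hcollect, pvORD es hpre g evs hp, pvDiff_eq]
  rw [List.filter_congr (fun e he => pvPointwise es hpre g evs hp e he)]

-- ===== VERDICT (by name: the statement is the Claim_ definition above) =====
theorem compute_exclusive_events_spec : Claim_equal_compute_exclusive_events := by
  intro es _ hpre
  unfold Spec_compute_exclusive_events
  exact (pv_main es hpre).symm ▸ rfl
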